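-- pv_equiv track=rewrite | github.com/ramzis/aoc2019 | src/3_1.py | solve
-- ===== SOURCE A (Python) =====
-- from collections import defaultdict
--
-- def solve(data):
--
--     solution = 0
--
--     def get_vector(dir):
--         assert(type(dir) == tuple)
--         if dir[0] == 'R':
--             vector = (1, 0)
--         elif dir[0] == 'L':
--             vector = (-1, 0)
--         elif dir[0] == 'U':
--             vector = (0, 1)
--         else:  # dir[0] == 'D'
--             vector = (0, -1)
--         return vector
--
--     def manhattan(a, b):
--         return abs(b[0] - a[0]) + abs(b[1] - a[1])
--
--     m = defaultdict(set)
--     port = (0, 0)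
--
--     for wire_id, wire_path in enumerate(data):
--         pos = tuple(port)
--         for point in wire_path:
--             dir = get_vector(point)
--             for step in range(point[1]):
--                 pos = (pos[0] + dir[0], pos[1] + dir[1])
--                 m[pos].add(wire_id)
--
--     solution = min([manhattan(point, port)
--                     for point, wires in m.items() if len(wires) > 1])
--
--     return solution
-- ===== SOURCE B (Python) =====
-- def solve(data):
--     # Segment-based re-implementation: instead of marking every visited grid
--     # cell, build the axis-aligned segments of each wire and intersect the
--     # segments of every pair of wires (perpendicular crossings and collinear
--     # overlaps), keeping the minimum Manhattan distance.
--     def segments(path):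
--         segs = []
--         x = y = 0
--         for d, n in path:
--             if n > 0:
--                 if d == 'R':
--                     segs.append((True, y, x + 1, x + n))
--                     x += n
--                 elif d == 'L':
--                     segs.append((True, y, x - n, x - 1))
--                     x -= n
--                 elif d == 'U':
--                     segs.append((False, x, y + 1, y + n))
--                     y += n
--                 else:
--                     segs.append((False, x, y - n, y - 1))
--                     y -= n
--         return segs
--
--     def axis_min(lo, hi):
--         return 0 if lo <= 0 <= hi else min(abs(lo), abs(hi))
--
--     wires = [segments(p) for p in data]
--     best = None
--     while wires:
--         w1 = wires.pop(0)
--         for w2 in wires: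
--             for h1, c1, a1, b1 in w1:
--                 for h2, c2, a2, b2 in w2:
--                     if h1 == h2:
--                         if c1 == c2:
--                             lo, hi = max(a1, a2), min(b1, b2)
--                             if lo <= hi:
--                                 d = abs(c1) + axis_min(lo, hi)
--                                 if best is None or d < best:
--                                     best = d
--                     elif a1 <= c2 <= b1 and a2 <= c1 <= b2:
--                         d = abs(c1) + abs(c2)
--                         if best is None or d < best:
--                             best = d
--     if best is None:
--         raise ValueError('no intersection')
--     return best
-- ===== Notes on version B (the rewrite author's own statement) =====
-- stated objective: alternative
-- what changed: Instead of walking every unit step of every wire and marking each visited grid cell in a dict of wire-id sets, B converts each wire into its axis-aligned segments and intersects the segments of every pair of wires directly (perpendicular crossings give one point, collinear overlaps give a clamped interval), taking the minimum Manhattan distance of any intersection.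
import Mathlib
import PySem

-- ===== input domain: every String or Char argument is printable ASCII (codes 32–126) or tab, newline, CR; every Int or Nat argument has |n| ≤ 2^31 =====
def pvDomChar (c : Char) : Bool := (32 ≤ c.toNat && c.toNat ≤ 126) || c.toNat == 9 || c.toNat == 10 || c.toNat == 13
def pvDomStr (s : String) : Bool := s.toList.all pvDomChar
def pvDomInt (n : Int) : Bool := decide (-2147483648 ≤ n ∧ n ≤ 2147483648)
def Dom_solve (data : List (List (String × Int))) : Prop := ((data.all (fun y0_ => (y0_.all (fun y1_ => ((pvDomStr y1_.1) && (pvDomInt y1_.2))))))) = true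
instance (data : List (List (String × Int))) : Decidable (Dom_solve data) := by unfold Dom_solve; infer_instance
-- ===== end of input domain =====

-- B replaces A's cell-by-cell grid walk with pairwise axis-aligned segment
-- intersection; a different algorithm of different cost shape (per-segment, not
-- per-step), not claimed faster.


-- ===== PORT A =====
def pvGetVector (dir : String × Int) : Int × Int :=
  if dir.1 = "R" then (1, 0)
  else if dir.1 = "L" then (-1, 0)
  else if dir.1 = "U" then (0, 1)
  else (0, -1)

def pvManhattan (a b : Int × Int) : Int := |b.1 - a.1| + |b.2 - a.2|

-- Python's defaultdict(set) keyed by grid cell is ported as a hash map; the loop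
-- structure is unchanged, and only len(_) of the value sets and the min over the
-- resulting distances are consumed, none of which depends on iteration order.
def pvStepA (wid : Int) (dir : Int × Int)
    (st : (Int × Int) × Std.HashMap (Int × Int) (PySem.Set Int)) (_step : Int) :
    (Int × Int) × Std.HashMap (Int × Int) (PySem.Set Int) :=
  let pos := (st.1.1 + dir.1, st.1.2 + dir.2)
  (pos, st.2.insert pos (PySem.Set.add (st.2.getD pos PySem.Set.empty) wid))

def pvMoveA (wid : Int) (st : (Int × Int) × Std.HashMap (Int × Int) (PySem.Set Int))
    (point : String × Int) : (Int × Int) × Std.HashMap (Int × Int) (PySem.Set Int) :=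
  (PySem.List.pyRange 0 point.2 1).foldl (pvStepA wid (pvGetVector point)) st

def pvWireA (m : Std.HashMap (Int × Int) (PySem.Set Int)) (wp : Int × List (String × Int)) :
    Std.HashMap (Int × Int) (PySem.Set Int) :=
  (wp.2.foldl (pvMoveA wp.1) ((0, 0), m)).2

def solve (data : List (List (String × Int))) : Int :=
  let m := (PySem.List.enumerate data 0).foldl pvWireA
    (∅ : Std.HashMap (Int × Int) (PySem.Set Int))
  let L := (m.toList.filter (fun pw => decide (1 < pw.2.length))).map
    (fun pw => pvManhattan pw.1 (0, 0))
  (PySem.List.min? L (fun x => x)).getD 0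

-- ===== PORT B =====
def pvSegStep (st : List (Bool × Int × Int × Int) × Int × Int) (dn : String × Int) :
    List (Bool × Int × Int × Int) × Int × Int :=
  let x := st.2.1
  let y := st.2.2
  if 0 < dn.2 then
    if dn.1 = "R" then (st.1 ++ [(true, y, x + 1, x + dn.2)], x + dn.2, y)
    else if dn.1 = "L" then (st.1 ++ [(true, y, x - dn.2, x - 1)], x - dn.2, y)
    else if dn.1 = "U" then (st.1 ++ [(false, x, y + 1, y + dn.2)], x, y + dn.2)
    else (st.1 ++ [(false, x, y - dn.2, y - 1)], x, y - dn.2)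
  else st

def pvSegments (path : List (String × Int)) : List (Bool × Int × Int × Int) :=
  (path.foldl pvSegStep ([], 0, 0)).1

def pvAxisMin (lo hi : Int) : Int := if lo ≤ 0 ∧ 0 ≤ hi then 0 else min |lo| |hi|

def pvUpd (best : Option Int) (d : Int) : Option Int :=
  match best with
  | none => some d
  | some b => if d < b then some d else some b

def pvCheck (best : Option Int) (s1 s2 : Bool × Int × Int × Int) : Option Int :=
  if s1.1 = s2.1 then
    if s1.2.1 = s2.2.1 then
      let lo := max s1.2.2.1 s2.2.2.1
      let hi := min s1.2.2.2 s2.2.2.2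
      if lo ≤ hi then pvUpd best (|s1.2.1| + pvAxisMin lo hi) else best
    else best
  else
    if s1.2.2.1 ≤ s2.2.1 ∧ s2.2.1 ≤ s1.2.2.2 ∧ s2.2.2.1 ≤ s1.2.1 ∧ s1.2.1 ≤ s2.2.2.2 then
      pvUpd best (|s1.2.1| + |s2.2.1|)
    else best

def pvBestLoop : Option Int → List (List (Bool × Int × Int × Int)) → Option Int
  | best, [] => best
  | best, w1 :: rest =>
      pvBestLoop
        (rest.foldl (fun b w2 =>
          w1.foldl (fun b s1 => w2.foldl (fun b s2 => pvCheck b s1 s2) b) b) best)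
        rest

def solve_alt (data : List (List (String × Int))) : Int :=
  match pvBestLoop none (data.map pvSegments) with
  | some d => d
  | none => 0

-- ===== PRECONDITION & SPEC =====
-- Spec-level description of the wires' geometry (kept separate from both ports):
-- move a of a wire starts at the componentwise sum of the earlier moves' displacements
-- and, if its step count is positive, covers one axis-aligned segment of cells.
def pvSegAt (x y : Int) (dn : String × Int) : Bool × Int × Int × Int :=
  if dn.1 = "R" then (true, y, x + 1, x + dn.2)
  else if dn.1 = "L" then (true, y, x - dn.2, x - 1)
  else if dn.1 = "U" then (false, x, y + 1, y + dn.2)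
  else (false, x, y - dn.2, y - 1)

def pvStart (path : List (String × Int)) (a : Nat) : Int × Int :=
  (((path.take a).map (fun dn => (pvGetVector dn).1 * max dn.2 0)).sum,
   ((path.take a).map (fun dn => (pvGetVector dn).2 * max dn.2 0)).sum)

def pvSegList (path : List (String × Int)) : List (Bool × Int × Int × Int) :=
  (List.range path.length).filterMap (fun a =>
    if 0 < (path.getD a ("", 0)).2 then
      some (pvSegAt (pvStart path a).1 (pvStart path a).2 (path.getD a ("", 0)))
    else none)

def pvCand (s1 s2 : Bool × Int × Int × Int) : Option Int :=
  if s1.1 = s2.1 then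
    if s1.2.1 = s2.2.1 ∧ max s1.2.2.1 s2.2.2.1 ≤ min s1.2.2.2 s2.2.2.2 then
      some (|s1.2.1| +
        (if max s1.2.2.1 s2.2.2.1 ≤ 0 ∧ 0 ≤ min s1.2.2.2 s2.2.2.2 then 0
         else min |max s1.2.2.1 s2.2.2.1| |min s1.2.2.2 s2.2.2.2|))
    else none
  else
    if s1.2.2.1 ≤ s2.2.1 ∧ s2.2.1 ≤ s1.2.2.2 ∧ s2.2.2.1 ≤ s1.2.1 ∧ s1.2.1 ≤ s2.2.2.2 then
      some (|s1.2.1| + |s2.2.1|)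
    else none

def pvPairs {α : Type} : List α → List (α × α)
  | [] => []
  | x :: xs => (xs.map (fun y => (x, y))) ++ pvPairs xs

-- Pre_solve excludes exactly the inputs where the two wire sets never intersect:
-- there A's min([]) raises ValueError (and B raises too).
def Pre_solve (data : List (List (String × Int))) : Prop :=
  ∃ pr ∈ pvPairs data, ∃ s1 ∈ pvSegList pr.1, ∃ s2 ∈ pvSegList pr.2,
    (pvCand s1 s2).isSome = true

instance (data : List (List (String × Int))) : Decidable (Pre_solve data) := by
  unfold Pre_solve; infer_instance

def pvWitness_solve : (List (List (String × Int))) := [[("R", 1)], [("R", 1)]]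

def Spec_solve (data : List (List (String × Int))) (out : Int) : Prop := out = solve_alt data
instance (data : List (List (String × Int))) (out : Int) : Decidable (Spec_solve data out) := by
  unfold Spec_solve; infer_instance

-- ===== CLAIM (what is proved, stated in full; the proofs are below) =====
def Claim_equal_solve : Prop := ∀ (data : List (List (String × Int))),
  Dom_solve data → Pre_solve data → Spec_solve data (solve data)


-- ===== LEMMAS AND PROOFS =====

-- Spec-level geometry (used only by the proofs).
def pvSegsFrom (x y : Int) : List (String × Int) → List (Bool × Int × Int × Int)
  | [] => []
  | dn :: rest =>
    if 0 < dn.2 then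
      if dn.1 = "R" then (true, y, x + 1, x + dn.2) :: pvSegsFrom (x + dn.2) y rest
      else if dn.1 = "L" then (true, y, x - dn.2, x - 1) :: pvSegsFrom (x - dn.2) y rest
      else if dn.1 = "U" then (false, x, y + 1, y + dn.2) :: pvSegsFrom x (y + dn.2) rest
      else (false, x, y - dn.2, y - 1) :: pvSegsFrom x (y - dn.2) rest
    else pvSegsFrom x y rest

def pvSegCells (s : Bool × Int × Int × Int) (p : Int × Int) : Prop :=
  if s.1 then p.2 = s.2.1 ∧ s.2.2.1 ≤ p.1 ∧ p.1 ≤ s.2.2.2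
  else p.1 = s.2.1 ∧ s.2.2.1 ≤ p.2 ∧ p.2 ≤ s.2.2.2

def pvVisits (path : List (String × Int)) (q : Int × Int) : Prop :=
  ∃ s ∈ pvSegsFrom 0 0 path, pvSegCells s q

def pvS (data : List (List (String × Int))) (q : Int × Int) : Prop :=
  ∃ pr ∈ pvPairs data, pvVisits pr.1 q ∧ pvVisits pr.2 q

-- candidate geometry
theorem pvCand_sound (s1 s2 : Bool × Int × Int × Int) (d : Int) (h : pvCand s1 s2 = some d) :
    ∃ p, pvSegCells s1 p ∧ pvSegCells s2 p ∧ d = |p.1| + |p.2| := by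
  rcases s1 with ⟨o1, c1, a1, b1⟩
  rcases s2 with ⟨o2, c2, a2, b2⟩
  simp only [pvCand] at h
  by_cases hb : o1 = o2
  · rw [if_pos hb] at h
    by_cases hc : c1 = c2 ∧ max a1 a2 ≤ min b1 b2
    · rw [if_pos hc] at h
      obtain ⟨hcc, hmm⟩ := hc
      injection h with hd
      subst hb hcc
      set t0 : Int := if max a1 a2 ≤ 0 ∧ 0 ≤ min b1 b2 then 0
        else if |max a1 a2| ≤ |min b1 b2| then max a1 a2 else min b1 b2 with ht0
      have habs : |t0| = (if max a1 a2 ≤ 0 ∧ 0 ≤ min b1 b2 then 0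
          else min |max a1 a2| |min b1 b2|) := by
        rw [ht0]
        split_ifs with hA hB <;> simp only [Int.abs_eq_natAbs] at * <;> omega
      have hrange : max a1 a2 ≤ t0 ∧ t0 ≤ min b1 b2 := by
        rw [ht0]
        split_ifs with hA hB <;> simp only [Int.abs_eq_natAbs] at * <;> omega
      cases o1
      · refine ⟨(c1, t0), ?_, ?_, ?_⟩
        · simp only [pvSegCells]; norm_num; omega
        · simp only [pvSegCells]; norm_num; omega
        · show d = |c1| + |t0|
          rw [habs, ← hd]
      · refine ⟨(t0, c1), ?_, ?_, ?_⟩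
        · simp only [pvSegCells]; norm_num; omega
        · simp only [pvSegCells]; norm_num; omega
        · show d = |t0| + |c1|
          rw [habs, ← hd, Int.add_comm]
    · rw [if_neg hc] at h; exact absurd h (by simp)
  · rw [if_neg hb] at h
    by_cases hc : a1 ≤ c2 ∧ c2 ≤ b1 ∧ a2 ≤ c1 ∧ c1 ≤ b2
    · rw [if_pos hc] at h
      obtain ⟨hA, hB, hC, hD⟩ := hc
      injection h with hd
      cases o1 <;> cases o2 <;> try exact absurd rfl hb
      · refine ⟨(c1, c2), ?_, ?_, ?_⟩
        · simp only [pvSegCells]; norm_num; omega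
        · simp only [pvSegCells]; norm_num; omega
        · show d = |c1| + |c2|
          rw [← hd]
      · refine ⟨(c2, c1), ?_, ?_, ?_⟩
        · simp only [pvSegCells]; norm_num; omega
        · simp only [pvSegCells]; norm_num; omega
        · show d = |c2| + |c1|
          rw [← hd, Int.add_comm]
    · rw [if_neg hc] at h; exact absurd h (by simp)

theorem pvCand_min (s1 s2 : Bool × Int × Int × Int) (d : Int) (h : pvCand s1 s2 = some d)
    (p : Int × Int) (h1 : pvSegCells s1 p) (h2 : pvSegCells s2 p) : d ≤ |p.1| + |p.2| := by
  rcases s1 with ⟨o1, c1, a1, b1⟩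
  rcases s2 with ⟨o2, c2, a2, b2⟩
  rcases p with ⟨px, py⟩
  simp only [pvCand] at h
  by_cases hb : o1 = o2
  · rw [if_pos hb] at h
    by_cases hc : c1 = c2 ∧ max a1 a2 ≤ min b1 b2
    · rw [if_pos hc] at h
      obtain ⟨hcc, hmm⟩ := hc
      injection h with hd
      subst hb hcc
      cases o1 <;>
        simp only [pvSegCells, if_true, if_false, Bool.false_eq_true, reduceIte] at h1 h2 <;>
        obtain ⟨hx1, hy1, hz1⟩ := h1 <;> obtain ⟨hx2, hy2, hz2⟩ := h2 <;>
        split_ifs at hd with hm <;>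
        simp only [Int.abs_eq_natAbs] at * <;> omega
    · rw [if_neg hc] at h; exact absurd h (by simp)
  · rw [if_neg hb] at h
    by_cases hc : a1 ≤ c2 ∧ c2 ≤ b1 ∧ a2 ≤ c1 ∧ c1 ≤ b2
    · rw [if_pos hc] at h
      injection h with hd
      obtain ⟨hA, hB, hC, hD⟩ := hc
      cases o1 <;> cases o2 <;> try exact absurd rfl hb
      all_goals
        simp only [pvSegCells, if_true, if_false, Bool.false_eq_true, reduceIte] at h1 h2
      all_goals
        obtain ⟨hx1, hy1, hz1⟩ := h1
      all_goals
        obtain ⟨hx2, hy2, hz2⟩ := h2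
      all_goals
        simp only [Int.abs_eq_natAbs] at *
      all_goals omega
    · rw [if_neg hc] at h; exact absurd h (by simp)

theorem pvCand_complete (s1 s2 : Bool × Int × Int × Int) (p : Int × Int)
    (h1 : pvSegCells s1 p) (h2 : pvSegCells s2 p) : (pvCand s1 s2).isSome = true := by
  rcases s1 with ⟨o1, c1, a1, b1⟩
  rcases s2 with ⟨o2, c2, a2, b2⟩
  rcases p with ⟨px, py⟩
  simp only [pvCand]
  cases o1 <;> cases o2 <;>
    simp only [pvSegCells, if_true, if_false, Bool.false_eq_true, reduceIte] at h1 h2 <;>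
    obtain ⟨hx1, hy1, hz1⟩ := h1 <;>
    obtain ⟨hx2, hy2, hz2⟩ := h2
  · rw [if_pos rfl, if_pos ⟨by omega, by omega⟩]; rfl
  · rw [if_neg (by simp), if_pos ⟨by omega, by omega, by omega, by omega⟩]; rfl
  · rw [if_neg (by simp), if_pos ⟨by omega, by omega, by omega, by omega⟩]; rfl
  · rw [if_pos rfl, if_pos ⟨by omega, by omega⟩]; rfl

-- B-side loop characterisation
theorem pvUpd_some (x d : Int) : pvUpd (some x) d = some (min x d) := by
  unfold pvUpd
  rcases le_or_gt x d with h | h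
  · rw [min_eq_left h]; simp only [if_neg (by omega : ¬ d < x)]
  · rw [min_eq_right (le_of_lt h)]; simp only [if_pos h]

theorem foldl_pvUpd_some (C : List Int) (x : Int) :
    C.foldl pvUpd (some x) = some (C.foldl min x) := by
  induction C generalizing x with
  | nil => rfl
  | cons c t ih => simp only [List.foldl_cons, pvUpd_some, ih]

def pvCandsPair (w1 w2 : List (Bool × Int × Int × Int)) : List Int :=
  w1.flatMap (fun s1 => w2.filterMap (fun s2 => pvCand s1 s2))

def pvCandList : List (List (Bool × Int × Int × Int)) → List Int
  | [] => []
  | w1 :: rest => rest.flatMap (pvCandsPair w1) ++ pvCandList rest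

theorem pvCheck_eq (b : Option Int) (s1 s2 : Bool × Int × Int × Int) :
    pvCheck b s1 s2 = match pvCand s1 s2 with | none => b | some d => pvUpd b d := by
  unfold pvCheck pvCand pvAxisMin
  by_cases h1 : s1.1 = s2.1 <;> simp only [h1, if_true, if_false]
  · by_cases h2 : s1.2.1 = s2.2.1 <;>
      by_cases h3 : max s1.2.2.1 s2.2.2.1 ≤ min s1.2.2.2 s2.2.2.2 <;>
      simp [h2, h3]
  · by_cases h4 : s1.2.2.1 ≤ s2.2.1 ∧ s2.2.1 ≤ s1.2.2.2 ∧ s2.2.2.1 ≤ s1.2.1 ∧ s1.2.1 ≤ s2.2.2.2 <;>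
      simp [h4]

theorem foldl_pvCheck_inner (w2 : List (Bool × Int × Int × Int)) (s1 : Bool × Int × Int × Int)
    (b : Option Int) : w2.foldl (fun b s2 => pvCheck b s1 s2) b
      = (w2.filterMap (fun s2 => pvCand s1 s2)).foldl pvUpd b := by
  induction w2 generalizing b with
  | nil => rfl
  | cons s2 t ih =>
    simp only [List.foldl_cons, List.filterMap_cons]
    rw [pvCheck_eq b s1 s2]
    cases h : pvCand s1 s2 with
    | none => simp only [h, ih]
    | some d => simp only [h, ih, List.foldl_cons]

theorem foldl_pvCheck_pair (w1 w2 : List (Bool × Int × Int × Int)) (b : Option Int) :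
    w1.foldl (fun b s1 => w2.foldl (fun b s2 => pvCheck b s1 s2) b) b
      = (pvCandsPair w1 w2).foldl pvUpd b := by
  induction w1 generalizing b with
  | nil => rfl
  | cons s1 t ih =>
    simp only [List.foldl_cons, pvCandsPair, List.flatMap_cons, List.foldl_append]
    rw [foldl_pvCheck_inner, ih]; rfl

theorem foldl_pvCheck_rest (w1 : List (Bool × Int × Int × Int))
    (rest : List (List (Bool × Int × Int × Int))) (b : Option Int) :
    rest.foldl (fun b w2 =>
        w1.foldl (fun b s1 => w2.foldl (fun b s2 => pvCheck b s1 s2) b) b) b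
      = (rest.flatMap (pvCandsPair w1)).foldl pvUpd b := by
  induction rest generalizing b with
  | nil => rfl
  | cons w2 t ih =>
    simp only [List.foldl_cons, List.flatMap_cons, List.foldl_append]
    rw [foldl_pvCheck_pair, ih]

theorem pvBestLoop_eq (ws : List (List (Bool × Int × Int × Int))) (b : Option Int) :
    pvBestLoop b ws = (pvCandList ws).foldl pvUpd b := by
  induction ws generalizing b with
  | nil => rfl
  | cons w1 rest ih =>
    show pvBestLoop (rest.foldl _ b) rest = _
    rw [ih, foldl_pvCheck_rest]
    simp only [pvCandList, List.foldl_append]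

theorem mem_pvCandList (ws : List (List (Bool × Int × Int × Int))) (d : Int) :
    d ∈ pvCandList ws ↔ ∃ pr ∈ pvPairs ws, ∃ s1 ∈ pr.1, ∃ s2 ∈ pr.2, pvCand s1 s2 = some d := by
  induction ws with
  | nil => simp [pvCandList, pvPairs]
  | cons w1 rest ih =>
    simp only [pvCandList, pvPairs, List.mem_append, List.mem_flatMap, pvCandsPair,
      List.mem_filterMap, List.mem_map, ih]
    constructor
    · rintro (⟨w2, hw2, s1, hs1, s2, hs2, hc⟩ | ⟨pr, hpr, rest'⟩)
      · exact ⟨(w1, w2), Or.inl ⟨w2, hw2, rfl⟩, s1, hs1, s2, hs2, hc⟩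
      · exact ⟨pr, Or.inr hpr, rest'⟩
    · rintro ⟨pr, (⟨w2, hw2, rfl⟩ | hpr), hrest⟩
      · obtain ⟨s1, hs1, s2, hs2, hc⟩ := hrest
        exact Or.inl ⟨w2, hw2, s1, hs1, s2, hs2, hc⟩
      · exact Or.inr ⟨pr, hpr, hrest⟩

theorem pvPairs_map {α β : Type} (f : α → β) (l : List α) :
    pvPairs (l.map f) = (pvPairs l).map (Prod.map f f) := by
  induction l with
  | nil => rfl
  | cons x xs ih =>
    simp only [List.map_cons, pvPairs, ih, List.map_append, List.map_map]
    rfl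

theorem pvSegStep_fold (path : List (String × Int)) :
    ∀ (acc : List (Bool × Int × Int × Int)) (x y : Int),
    (path.foldl pvSegStep (acc, x, y)).1 = acc ++ pvSegsFrom x y path := by
  induction path with
  | nil => intro acc x y; simp [pvSegsFrom]
  | cons dn rest ih =>
    intro acc x y
    rw [List.foldl_cons]
    show (rest.foldl pvSegStep (pvSegStep (acc, x, y) dn)).1 = _
    simp only [pvSegStep, pvSegsFrom]
    by_cases hn : 0 < dn.2 <;> simp only [hn, if_true, if_false]
    · by_cases hR : dn.1 = "R" <;> simp only [hR, if_true, if_false]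
      · rw [ih]; simp
      · by_cases hL : dn.1 = "L" <;> simp only [hL, if_true, if_false]
        · rw [ih]; simp
        · by_cases hU : dn.1 = "U" <;> simp only [hU, if_true, if_false]
          · rw [ih]; simp
          · rw [ih]; simp
    · exact ih acc x y

theorem pvSegments_eq (path : List (String × Int)) : pvSegments path = pvSegsFrom 0 0 path := by
  unfold pvSegments
  rw [pvSegStep_fold path [] 0 0, List.nil_append]

-- A-side loop characterisation
theorem foldl_ignore_iterate {α β : Type} (l : List α) (g : β → β) (st : β) :
    l.foldl (fun s _ => g s) st = g^[l.length] st := by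
  induction l generalizing st with
  | nil => rfl
  | cons a t ih => simp only [List.foldl_cons, List.length_cons, Function.iterate_succ_apply, ih]

theorem pvGetVector_R {dn : String × Int} (h : dn.1 = "R") : pvGetVector dn = (1, 0) := by
  simp [pvGetVector, h]
theorem pvGetVector_L {dn : String × Int} (h : dn.1 = "L") : pvGetVector dn = (-1, 0) := by
  simp [pvGetVector, h]
theorem pvGetVector_U {dn : String × Int} (h : dn.1 = "U") : pvGetVector dn = (0, 1) := by
  simp [pvGetVector, h]
theorem pvGetVector_D {dn : String × Int} (h1 : ¬ dn.1 = "R") (h2 : ¬ dn.1 = "L")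
    (h3 : ¬ dn.1 = "U") : pvGetVector dn = (0, -1) := by
  simp [pvGetVector, h1, h2, h3]

theorem pvSegsFrom_cons (dn : String × Int) (rest : List (String × Int)) (x y : Int) :
    pvSegsFrom x y (dn :: rest)
      = pvSegsFrom x y [dn]
        ++ pvSegsFrom (x + (dn.2.toNat : Int) * (pvGetVector dn).1)
            (y + (dn.2.toNat : Int) * (pvGetVector dn).2) rest := by
  by_cases hn : 0 < dn.2
  · have htn : ((dn.2.toNat : Int)) = dn.2 := Int.toNat_of_nonneg (by omega)
    by_cases hR : dn.1 = "R"
    · rw [pvGetVector_R hR, show x + (dn.2.toNat : Int) * (1, (0:Int)).1 = x + dn.2 by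
          simp; omega, show y + (dn.2.toNat : Int) * (1, (0:Int)).2 = y by simp]
      simp [pvSegsFrom, hR, hn]
    · by_cases hL : dn.1 = "L"
      · rw [pvGetVector_L hL, show x + (dn.2.toNat : Int) * ((-1 : Int), (0:Int)).1 = x - dn.2 by
            simp; omega, show y + (dn.2.toNat : Int) * ((-1 : Int), (0:Int)).2 = y by simp]
        simp [pvSegsFrom, hR, hL, hn]
      · by_cases hU : dn.1 = "U"
        · rw [pvGetVector_U hU, show x + (dn.2.toNat : Int) * ((0:Int), (1:Int)).1 = x by simp,
            show y + (dn.2.toNat : Int) * ((0:Int), (1:Int)).2 = y + dn.2 by simp; omega]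
          simp [pvSegsFrom, hR, hL, hU, hn]
        · rw [pvGetVector_D hR hL hU,
            show x + (dn.2.toNat : Int) * ((0:Int), (-1:Int)).1 = x by simp,
            show y + (dn.2.toNat : Int) * ((0:Int), (-1:Int)).2 = y - dn.2 by simp; omega]
          simp [pvSegsFrom, hR, hL, hU, hn]
  · have htn : ((dn.2.toNat : Int)) = 0 := by omega
    rw [htn, show x + (0 : Int) * (pvGetVector dn).1 = x by ring,
      show y + (0 : Int) * (pvGetVector dn).2 = y by ring]
    simp [pvSegsFrom, hn]

theorem pvMoveCells (dn : String × Int) (x y : Int) (q : Int × Int) :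
    (∃ k : Nat, 1 ≤ k ∧ k ≤ dn.2.toNat
        ∧ q = (x + k * (pvGetVector dn).1, y + k * (pvGetVector dn).2))
      ↔ ∃ s ∈ pvSegsFrom x y [dn], pvSegCells s q := by
  rcases q with ⟨qx, qy⟩
  by_cases hn : 0 < dn.2
  · by_cases hR : dn.1 = "R"
    · rw [pvGetVector_R hR]
      simp [pvSegsFrom, hR, hn, pvSegCells, Prod.mk.injEq]
      constructor
      · rintro ⟨k, h1, h2, h3, h4⟩; refine ⟨by omega, by omega, by omega⟩
      · rintro ⟨h1, h2, h3⟩; exact ⟨(qx - x).toNat, by omega, by omega, by omega, by omega⟩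
    · by_cases hL : dn.1 = "L"
      · rw [pvGetVector_L hL]
        simp [pvSegsFrom, hR, hL, hn, pvSegCells, Prod.mk.injEq]
        constructor
        · rintro ⟨k, h1, h2, h3, h4⟩; refine ⟨by omega, by omega, by omega⟩
        · rintro ⟨h1, h2, h3⟩; exact ⟨(x - qx).toNat, by omega, by omega, by omega, by omega⟩
      · by_cases hU : dn.1 = "U"
        · rw [pvGetVector_U hU]
          simp [pvSegsFrom, hR, hL, hU, hn, pvSegCells, Prod.mk.injEq]
          constructor
          · rintro ⟨k, h1, h2, h3, h4⟩; refine ⟨by omega, by omega, by omega⟩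
          · rintro ⟨h1, h2, h3⟩; exact ⟨(qy - y).toNat, by omega, by omega, by omega, by omega⟩
        · rw [pvGetVector_D hR hL hU]
          simp [pvSegsFrom, hR, hL, hU, hn, pvSegCells, Prod.mk.injEq]
          constructor
          · rintro ⟨k, h1, h2, h3, h4⟩; refine ⟨by omega, by omega, by omega⟩
          · rintro ⟨h1, h2, h3⟩; exact ⟨(y - qy).toNat, by omega, by omega, by omega, by omega⟩
  · have htn : dn.2.toNat = 0 := by omega
    simp only [pvSegsFrom, hn, if_false, htn, List.not_mem_nil, false_and, exists_false,
      iff_false, not_exists, reduceIte]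
    rintro k ⟨h1, h2, h3⟩
    omega

theorem pvSegsFrom_single (x y : Int) (dn : String × Int) :
    pvSegsFrom x y [dn] = if 0 < dn.2 then [pvSegAt x y dn] else [] := by
  by_cases hn : 0 < dn.2
  · by_cases hR : dn.1 = "R"
    · simp [pvSegsFrom, pvSegAt, hn, hR]
    · by_cases hL : dn.1 = "L"
      · simp [pvSegsFrom, pvSegAt, hn, hR, hL]
      · by_cases hU : dn.1 = "U"
        · simp [pvSegsFrom, pvSegAt, hn, hR, hL, hU]
        · simp [pvSegsFrom, pvSegAt, hn, hR, hL, hU]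
  · simp [pvSegsFrom, hn]

theorem pvStart_zero (path : List (String × Int)) : pvStart path 0 = (0, 0) := by
  simp [pvStart]

theorem pvStart_succ (dn : String × Int) (rest : List (String × Int)) (a : Nat) :
    pvStart (dn :: rest) (a + 1)
      = ((pvGetVector dn).1 * max dn.2 0 + (pvStart rest a).1,
         (pvGetVector dn).2 * max dn.2 0 + (pvStart rest a).2) := by
  simp [pvStart, List.take_succ_cons]

theorem mem_pvSegsFrom (path : List (String × Int)) : ∀ (x y : Int) (s : Bool × Int × Int × Int),
    s ∈ pvSegsFrom x y path ↔ ∃ a : Nat, a < path.length ∧ 0 < (path.getD a ("", 0)).2 ∧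
      s = pvSegAt (x + (pvStart path a).1) (y + (pvStart path a).2) (path.getD a ("", 0)) := by
  induction path with
  | nil =>
    intro x y s
    simp [pvSegsFrom]
  | cons dn rest ih =>
    intro x y s
    rw [pvSegsFrom_cons, List.mem_append, pvSegsFrom_single, ih]
    have htm : ((dn.2.toNat : Int)) = max dn.2 0 := by omega
    have h1 : ∀ a : Nat, x + (dn.2.toNat : Int) * (pvGetVector dn).1 + (pvStart rest a).1
        = x + (pvStart (dn :: rest) (a + 1)).1 := by
      intro a
      rw [pvStart_succ, htm]
      ring
    have h2 : ∀ a : Nat, y + (dn.2.toNat : Int) * (pvGetVector dn).2 + (pvStart rest a).2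
        = y + (pvStart (dn :: rest) (a + 1)).2 := by
      intro a
      rw [pvStart_succ, htm]
      ring
    constructor
    · rintro (hs | ⟨a, ha, hn, rfl⟩)
      · by_cases hn : 0 < dn.2
        · rw [if_pos hn] at hs
          simp only [List.mem_singleton] at hs
          refine ⟨0, by simp, by simpa using hn, ?_⟩
          rw [pvStart_zero]
          simpa using hs
        · rw [if_neg hn] at hs
          simp at hs
      · refine ⟨a + 1, by simp only [List.length_cons]; omega, by simpa using hn, ?_⟩
        rw [← h1 a, ← h2 a]
        simp only [List.getD_cons_succ]
    · rintro ⟨a, ha, hn, hs⟩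
      rcases a with _ | a
      · left
        rw [if_pos (by simpa using hn)]
        rw [pvStart_zero] at hs
        simpa using hs
      · right
        refine ⟨a, by simp only [List.length_cons] at ha; omega, by simpa using hn, ?_⟩
        rw [← h1 a, ← h2 a] at hs
        simpa using hs

theorem mem_pvSegList (path : List (String × Int)) (s : Bool × Int × Int × Int) :
    s ∈ pvSegList path ↔ s ∈ pvSegsFrom 0 0 path := by
  rw [mem_pvSegsFrom]
  simp only [pvSegList, List.mem_filterMap, List.mem_range]
  constructor
  · rintro ⟨a, ha, hfa⟩
    by_cases hn : 0 < (path.getD a ("", 0)).2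
    · rw [if_pos hn] at hfa
      injection hfa with hfa
      exact ⟨a, ha, hn, by rw [← hfa]; simp⟩
    · rw [if_neg hn] at hfa
      exact absurd hfa (by simp)
  · rintro ⟨a, ha, hn, rfl⟩
    refine ⟨a, ha, ?_⟩
    rw [if_pos hn]
    simp

theorem pvStepA_iter (wid : Int) (v : Int × Int) (N : Nat) :
    ∀ (x y : Int) (m : Std.HashMap (Int × Int) (PySem.Set Int)),
    (fun st => pvStepA wid v st 0)^[N] ((x, y), m)
      = ((x + N * v.1, y + N * v.2),
         ((fun st => pvStepA wid v st 0)^[N] ((x, y), m)).2)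
    ∧ (∀ q w, w ∈ (((fun st => pvStepA wid v st 0)^[N] ((x, y), m)).2).getD q PySem.Set.empty ↔
        w ∈ m.getD q PySem.Set.empty
        ∨ (w = wid ∧ ∃ k : Nat, 1 ≤ k ∧ k ≤ N ∧ q = (x + k * v.1, y + k * v.2)))
    ∧ ((∀ q, (m.getD q PySem.Set.empty).Nodup) →
        ∀ q, ((((fun st => pvStepA wid v st 0)^[N] ((x, y), m)).2).getD q PySem.Set.empty).Nodup) := by
  induction N with
  | zero =>
    intro x y m
    refine ⟨by simp, ?_, by intro h q; simpa using h q⟩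
    intro q w
    simp only [Function.iterate_zero, id_eq]
    constructor
    · intro hw; exact Or.inl hw
    · rintro (hw | ⟨_, k, hk1, hk2, _⟩)
      · exact hw
      · omega
  | succ N IH =>
    intro x y m
    obtain ⟨ih1, ih2, ih3⟩ := IH x y m
    set M := (((fun st => pvStepA wid v st 0)^[N] ((x, y), m)).2) with hM
    have hstate : (fun st => pvStepA wid v st 0)^[N + 1] ((x, y), m)
        = ((x + (N : Int) * v.1 + v.1, y + (N : Int) * v.2 + v.2),
           M.insert (x + (N : Int) * v.1 + v.1, y + (N : Int) * v.2 + v.2)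
             (PySem.Set.add (M.getD (x + (N : Int) * v.1 + v.1, y + (N : Int) * v.2 + v.2)
               PySem.Set.empty) wid)) := by
      rw [Function.iterate_succ_apply', ih1]
      rfl
    have hc : ((x : Int) + ((N : Nat) + 1 : Nat) * v.1, y + ((N : Nat) + 1 : Nat) * v.2)
        = ((x + (N : Int) * v.1 + v.1, y + (N : Int) * v.2 + v.2) : Int × Int) := by
      rw [Prod.mk.injEq]
      push_cast
      constructor <;> ring
    refine ⟨?_, ?_, ?_⟩
    · rw [hstate, hc]
    · intro q w
      rw [hstate]
      simp only [Std.HashMap.getD_insert, beq_iff_eq]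
      split_ifs with hq
      · subst hq
        rw [PySem.Set.mem_add, ih2 _ w]
        constructor
        · rintro ((hw | ⟨hwid, k, hk1, hk2, hk3⟩) | hwid)
          · exact Or.inl hw
          · exact Or.inr ⟨hwid, k, hk1, by omega, hk3⟩
          · exact Or.inr ⟨hwid, N + 1, by omega, le_refl _, hc.symm⟩
        · rintro (hw | ⟨hwid, k, hk1, hk2, hk3⟩)
          · exact Or.inl (Or.inl hw)
          · rcases Nat.lt_or_ge k (N + 1) with hk | hk
            · exact Or.inl (Or.inr ⟨hwid, k, hk1, by omega, hk3⟩)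
            · exact Or.inr hwid
      · rw [ih2 q w]
        constructor
        · rintro (hw | ⟨hwid, k, hk1, hk2, hk3⟩)
          · exact Or.inl hw
          · exact Or.inr ⟨hwid, k, hk1, by omega, hk3⟩
        · rintro (hw | ⟨hwid, k, hk1, hk2, hk3⟩)
          · exact Or.inl hw
          · refine Or.inr ⟨hwid, k, hk1, ?_, hk3⟩
            rcases Nat.lt_or_ge k (N + 1) with hk | hk
            · omega
            · exfalso
              apply hq
              have hk' : k = N + 1 := by omega
              rw [hk3, hk', hc]
    · intro hnd q
      rw [hstate]
      simp only [Std.HashMap.getD_insert, beq_iff_eq]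
      split_ifs with hq
      · exact PySem.Set.nodup_add _ _ (ih3 hnd _)
      · exact ih3 hnd q

theorem pvMoveA_eq (wid : Int) (x y : Int) (m : Std.HashMap (Int × Int) (PySem.Set Int))
    (point : String × Int) :
    pvMoveA wid ((x, y), m) point
      = (fun st => pvStepA wid (pvGetVector point) st 0)^[point.2.toNat] ((x, y), m) := by
  unfold pvMoveA
  have hfe : (PySem.List.pyRange 0 point.2 1).foldl (pvStepA wid (pvGetVector point)) ((x, y), m)
      = (PySem.List.pyRange 0 point.2 1).foldl
          (fun st _ => pvStepA wid (pvGetVector point) st 0) ((x, y), m) := rfl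
  rw [hfe, foldl_ignore_iterate, PySem.List.length_pyRange_one]
  norm_num

theorem pvWireFold (wid : Int) (path : List (String × Int)) :
    ∀ (x y : Int) (m : Std.HashMap (Int × Int) (PySem.Set Int)),
    (∀ q w, w ∈ ((path.foldl (pvMoveA wid) ((x, y), m)).2).getD q PySem.Set.empty ↔
        w ∈ m.getD q PySem.Set.empty
        ∨ (w = wid ∧ ∃ s ∈ pvSegsFrom x y path, pvSegCells s q))
    ∧ ((∀ q, (m.getD q PySem.Set.empty).Nodup) →
        ∀ q, (((path.foldl (pvMoveA wid) ((x, y), m)).2).getD q PySem.Set.empty).Nodup) := by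
  induction path with
  | nil =>
    intro x y m
    refine ⟨?_, fun h q => h q⟩
    intro q w
    simp [pvSegsFrom]
  | cons dn rest ih =>
    intro x y m
    obtain ⟨it1, it2, it3⟩ := pvStepA_iter wid (pvGetVector dn) dn.2.toNat x y m
    have hmv : pvMoveA wid ((x, y), m) dn
        = ((x + (dn.2.toNat : Int) * (pvGetVector dn).1,
            y + (dn.2.toNat : Int) * (pvGetVector dn).2),
           ((fun st => pvStepA wid (pvGetVector dn) st 0)^[dn.2.toNat] ((x, y), m)).2) := by
      rw [pvMoveA_eq]
      exact it1
    rw [List.foldl_cons, hmv]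
    obtain ⟨ih1, ih2⟩ := ih (x + (dn.2.toNat : Int) * (pvGetVector dn).1)
      (y + (dn.2.toNat : Int) * (pvGetVector dn).2)
      (((fun st => pvStepA wid (pvGetVector dn) st 0)^[dn.2.toNat] ((x, y), m)).2)
    refine ⟨?_, ?_⟩
    · intro q w
      rw [ih1 q w, it2 q w, pvSegsFrom_cons]
      rw [show (∃ s ∈ pvSegsFrom x y [dn]
            ++ pvSegsFrom (x + (dn.2.toNat : Int) * (pvGetVector dn).1)
                (y + (dn.2.toNat : Int) * (pvGetVector dn).2) rest, pvSegCells s q)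
          ↔ ((∃ s ∈ pvSegsFrom x y [dn], pvSegCells s q)
            ∨ (∃ s ∈ pvSegsFrom (x + (dn.2.toNat : Int) * (pvGetVector dn).1)
                (y + (dn.2.toNat : Int) * (pvGetVector dn).2) rest, pvSegCells s q))
          from by simp only [List.mem_append, or_and_right, exists_or]]
      rw [← pvMoveCells]
      constructor
      · rintro ((h | ⟨hw, hx⟩) | ⟨hw, hy⟩)
        · exact Or.inl h
        · exact Or.inr ⟨hw, Or.inl hx⟩
        · exact Or.inr ⟨hw, Or.inr hy⟩
      · rintro (h | ⟨hw, hx | hy⟩)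
        · exact Or.inl (Or.inl h)
        · exact Or.inl (Or.inr ⟨hw, hx⟩)
        · exact Or.inr ⟨hw, hy⟩
    · intro hnd q
      exact ih2 (it3 hnd) q

theorem pvAllWires (ws : List (List (String × Int))) :
    ∀ (s : Int) (m : Std.HashMap (Int × Int) (PySem.Set Int)),
    (∀ q w, w ∈ m.getD q PySem.Set.empty → w < s) →
    (∀ q w, w ∈ ((PySem.List.enumerate ws s).foldl pvWireA m).getD q PySem.Set.empty ↔
        w ∈ m.getD q PySem.Set.empty
        ∨ ∃ k : Nat, k < ws.length ∧ w = s + k ∧ pvVisits (ws.getD k []) q)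
    ∧ ((∀ q, (m.getD q PySem.Set.empty).Nodup) →
        ∀ q, (((PySem.List.enumerate ws s).foldl pvWireA m).getD q PySem.Set.empty).Nodup) := by
  induction ws with
  | nil =>
    intro s m _hb
    refine ⟨?_, fun h q => h q⟩
    intro q w
    simp [PySem.List.enumerate]
  | cons w1 ws' ih =>
    intro s m hb
    rw [PySem.List.enumerate_cons, List.foldl_cons]
    have wfa : (∀ q w, w ∈ (pvWireA m (s, w1)).getD q PySem.Set.empty ↔
          w ∈ m.getD q PySem.Set.empty
          ∨ (w = s ∧ ∃ sg ∈ pvSegsFrom 0 0 w1, pvSegCells sg q))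
        ∧ ((∀ q, (m.getD q PySem.Set.empty).Nodup) →
            ∀ q, ((pvWireA m (s, w1)).getD q PySem.Set.empty).Nodup) := pvWireFold s w1 0 0 m
    obtain ⟨wf1, wf2⟩ := wfa
    have hb1 : ∀ q w, w ∈ (pvWireA m (s, w1)).getD q PySem.Set.empty → w < s + 1 := by
      intro q w hw
      rcases (wf1 q w).1 hw with hw' | ⟨hwid, _⟩
      · have := hb q w hw'
        omega
      · omega
    obtain ⟨ih1, ih2⟩ := ih (s + 1) (pvWireA m (s, w1)) hb1
    refine ⟨?_, ?_⟩
    · intro q w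
      rw [ih1 q w, wf1 q w]
      constructor
      · rintro ((hw | ⟨hwid, hvis⟩) | ⟨k, hk, hkw, hkv⟩)
        · exact Or.inl hw
        · refine Or.inr ⟨0, by simp, by omega, ?_⟩
          simpa [pvVisits] using hvis
        · refine Or.inr ⟨k + 1, by simp only [List.length_cons]; omega, by push_cast at hkw ⊢; omega, ?_⟩
          simpa using hkv
      · rintro (hw | ⟨k, hk, hkw, hkv⟩)
        · exact Or.inl (Or.inl hw)
        · rcases k with _ | k
          · refine Or.inl (Or.inr ⟨by omega, ?_⟩)
            simpa [pvVisits] using hkv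
          · refine Or.inr ⟨k, by simp only [List.length_cons] at hk; omega,
              by push_cast at hkw ⊢; omega, ?_⟩
            simpa using hkv
    · intro hnd q
      exact ih2 (wf2 hnd) q

theorem one_lt_length_of_ne {α : Type} {l : List α} {a b : α}
    (ha : a ∈ l) (hb : b ∈ l) (hab : a ≠ b) : 1 < l.length := by
  rcases l with _ | ⟨x, _ | ⟨y, t⟩⟩
  · simp at ha
  · simp at ha hb
    exact absurd (ha.trans hb.symm) hab
  · simp only [List.length_cons]; omega

theorem exists_ne_of_one_lt_length {α : Type} {l : List α} (hnd : l.Nodup)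
    (h : 1 < l.length) : ∃ a ∈ l, ∃ b ∈ l, a ≠ b := by
  rcases l with _ | ⟨x, _ | ⟨y, t⟩⟩
  · simp at h
  · simp at h
  · refine ⟨x, by simp, y, by simp, ?_⟩
    intro hxy
    subst hxy
    simp at hnd

theorem mem_pvPairs {α : Type} (dflt : α) (l : List α) (pr : α × α) :
    pr ∈ pvPairs l ↔ ∃ i j : Nat, i < j ∧ j < l.length ∧ pr = (l.getD i dflt, l.getD j dflt) := by
  induction l with
  | nil =>
    simp only [pvPairs, List.not_mem_nil, false_iff]
    rintro ⟨i, j, hij, hj, _⟩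
    simp at hj
  | cons x xs ih =>
    simp only [pvPairs, List.mem_append, List.mem_map, ih]
    constructor
    · rintro (⟨y, hy, rfl⟩ | ⟨i, j, hij, hjl, rfl⟩)
      · obtain ⟨k, hk, hky⟩ := List.mem_iff_getElem.1 hy
        refine ⟨0, k + 1, by omega, by simp only [List.length_cons]; omega, ?_⟩
        simp only [List.getD_cons_zero, List.getD_cons_succ]
        rw [List.getD_eq_getElem _ _ hk, hky]
      · exact ⟨i + 1, j + 1, by omega, by simp only [List.length_cons]; omega,
          by simp only [List.getD_cons_succ]⟩
    · rintro ⟨i, j, hij, hjl, hpr⟩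
      rcases i with _ | i
      · rcases j with _ | j
        · omega
        · left
          refine ⟨xs.getD j dflt, ?_, ?_⟩
          · have hj' : j < xs.length := by simp only [List.length_cons] at hjl; omega
            rw [List.getD_eq_getElem _ _ hj']
            exact List.getElem_mem _
          · rw [hpr]; simp only [List.getD_cons_zero, List.getD_cons_succ]
      · rcases j with _ | j
        · omega
        · right
          exact ⟨i, j, by omega, by simp only [List.length_cons] at hjl; omega,
            by rw [hpr]; simp only [List.getD_cons_succ]⟩

-- the distances list of port A
theorem mem_distList (data : List (List (String × Int))) (d : Int) :
    (d ∈ (((((PySem.List.enumerate data 0).foldl pvWireA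
        (∅ : Std.HashMap (Int × Int) (PySem.Set Int))).toList.filter
        (fun pw => decide (1 < pw.2.length))).map (fun pw => pvManhattan pw.1 (0, 0))))
      ↔ ∃ q, pvS data q ∧ d = |q.1| + |q.2|) := by
  set F := (PySem.List.enumerate data 0).foldl pvWireA
    (∅ : Std.HashMap (Int × Int) (PySem.Set Int)) with hF
  have hbase : ∀ q w, w ∈ (∅ : Std.HashMap (Int × Int) (PySem.Set Int)).getD q
      PySem.Set.empty → w < 0 := by
    intro q w hw
    rw [Std.HashMap.getD_empty] at hw
    simp [PySem.Set.empty] at hw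
  obtain ⟨hm, hnd⟩ := pvAllWires data 0 ∅ hbase
  have hmem : ∀ q w, w ∈ F.getD q PySem.Set.empty ↔
      ∃ k : Nat, k < data.length ∧ w = (k : Int) ∧ pvVisits (data.getD k []) q := by
    intro q w
    have h := hm q w
    rw [Std.HashMap.getD_empty] at h
    simpa [PySem.Set.empty] using h
  have hndv : ∀ q, (F.getD q PySem.Set.empty).Nodup := by
    apply hnd
    intro q
    rw [Std.HashMap.getD_empty]
    exact List.nodup_nil
  have hlen : ∀ q, 1 < (F.getD q PySem.Set.empty).length ↔ pvS data q := by
    intro q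
    constructor
    · intro h1
      obtain ⟨w1, hw1, w2, hw2, hne⟩ := exists_ne_of_one_lt_length (hndv q) h1
      obtain ⟨k1, hk1, rfl, hv1⟩ := (hmem q w1).1 hw1
      obtain ⟨k2, hk2, rfl, hv2⟩ := (hmem q w2).1 hw2
      have hkne : k1 ≠ k2 := by
        intro he
        apply hne
        rw [he]
      rcases Nat.lt_or_ge k1 k2 with hlt | hge
      · exact ⟨(data.getD k1 [], data.getD k2 []),
          (mem_pvPairs [] data _).2 ⟨k1, k2, hlt, hk2, rfl⟩, hv1, hv2⟩
      · have hlt : k2 < k1 := by omega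
        exact ⟨(data.getD k2 [], data.getD k1 []),
          (mem_pvPairs [] data _).2 ⟨k2, k1, hlt, hk1, rfl⟩, hv2, hv1⟩
    · rintro ⟨pr, hpr, hv1, hv2⟩
      obtain ⟨i, j, hij, hjl, hpr'⟩ := (mem_pvPairs [] data pr).1 hpr
      have hw1 : (i : Int) ∈ F.getD q PySem.Set.empty :=
        (hmem q i).2 ⟨i, by omega, rfl, by rw [hpr'] at hv1; exact hv1⟩
      have hw2 : (j : Int) ∈ F.getD q PySem.Set.empty :=
        (hmem q j).2 ⟨j, hjl, rfl, by rw [hpr'] at hv2; exact hv2⟩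
      refine one_lt_length_of_ne hw1 hw2 ?_
      intro he
      have : i = j := by exact_mod_cast he
      omega
  simp only [List.mem_map, List.mem_filter]
  constructor
  · rintro ⟨⟨q, sset⟩, ⟨hitems, hgt⟩, rfl⟩
    have hget : F[q]? = some sset := Std.HashMap.mem_toList_iff_getElem?_eq_some.1 hitems
    have hset : F.getD q PySem.Set.empty = sset := by
      rw [Std.HashMap.getD_eq_getD_getElem?, hget]
      rfl
    simp only [decide_eq_true_eq] at hgt
    have h1 : 1 < (F.getD q PySem.Set.empty).length := by rw [hset]; exact hgt
    refine ⟨q, (hlen q).1 h1, ?_⟩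
    simp [pvManhattan]
  · rintro ⟨q, hS, rfl⟩
    have h1 : 1 < (F.getD q PySem.Set.empty).length := (hlen q).2 hS
    cases hval : F[q]? with
    | none =>
      rw [Std.HashMap.getD_eq_getD_getElem?, hval] at h1
      simp [PySem.Set.empty] at h1
    | some val =>
      have hitems : (q, val) ∈ F.toList := Std.HashMap.mem_toList_iff_getElem?_eq_some.2 hval
      have hgd : F.getD q PySem.Set.empty = val := by
        rw [Std.HashMap.getD_eq_getD_getElem?, hval]
        rfl
      refine ⟨(q, val), ⟨hitems, ?_⟩, ?_⟩
      · simp only [decide_eq_true_eq]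
        rw [← hgd]
        exact h1
      · simp [pvManhattan]

theorem pre_nonempty (data : List (List (String × Int))) (h : Pre_solve data) :
    ∃ q, pvS data q := by
  obtain ⟨pr, hpr, s1, hs1, s2, hs2, hS⟩ := h
  obtain ⟨dd, hdd⟩ := Option.isSome_iff_exists.1 hS
  obtain ⟨p, hp1, hp2, _⟩ := pvCand_sound s1 s2 dd hdd
  exact ⟨p, pr, hpr, ⟨s1, (mem_pvSegList _ _).1 hs1, hp1⟩, ⟨s2, (mem_pvSegList _ _).1 hs2, hp2⟩⟩

theorem B_mem (data : List (List (String × Int))) (d : Int) :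
    d ∈ pvCandList (data.map pvSegments)
      ↔ ∃ pr ∈ pvPairs data, ∃ s1 ∈ pvSegsFrom 0 0 pr.1, ∃ s2 ∈ pvSegsFrom 0 0 pr.2,
          pvCand s1 s2 = some d := by
  rw [mem_pvCandList, pvPairs_map]
  constructor
  · rintro ⟨pr, hpr, s1, hs1, s2, hs2, hc⟩
    obtain ⟨pr0, hpr0, rfl⟩ := List.mem_map.1 hpr
    refine ⟨pr0, hpr0, s1, ?_, s2, ?_, hc⟩
    · rw [← pvSegments_eq]; exact hs1
    · rw [← pvSegments_eq]; exact hs2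
  · rintro ⟨pr, hpr, s1, hs1, s2, hs2, hc⟩
    refine ⟨Prod.map pvSegments pvSegments pr, List.mem_map.2 ⟨pr, hpr, rfl⟩,
      s1, ?_, s2, ?_, hc⟩
    · show s1 ∈ pvSegments pr.1; rw [pvSegments_eq]; exact hs1
    · show s2 ∈ pvSegments pr.2; rw [pvSegments_eq]; exact hs2

theorem B_char (data : List (List (String × Int))) (h : Pre_solve data) :
    ∃ v, solve_alt data = v ∧ v ∈ pvCandList (data.map pvSegments)
      ∧ ∀ d ∈ pvCandList (data.map pvSegments), v ≤ d := by
  have hne : pvCandList (data.map pvSegments) ≠ [] := by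
    obtain ⟨pr, hpr, s1, hs1, s2, hs2, hS⟩ := h
    obtain ⟨dd, hdd⟩ := Option.isSome_iff_exists.1 hS
    intro h0
    have hmem : dd ∈ pvCandList (data.map pvSegments) :=
      (B_mem data dd).2 ⟨pr, hpr, s1, (mem_pvSegList _ _).1 hs1,
        s2, (mem_pvSegList _ _).1 hs2, hdd⟩
    rw [h0] at hmem
    simp at hmem
  rcases hC : pvCandList (data.map pvSegments) with _ | ⟨c, t⟩
  · exact absurd hC hne
  · refine ⟨t.foldl min c, ?_, ?_, ?_⟩
    · unfold solve_alt
      rw [pvBestLoop_eq, hC]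
      simp only [List.foldl_cons]
      show (match t.foldl pvUpd (pvUpd none c) with | some d => d | none => 0) = _
      have : pvUpd none c = some c := rfl
      rw [this, foldl_pvUpd_some]
    · rcases PySem.List.foldl_min_mem t c with heq | hmem
      · rw [heq]; exact List.mem_cons_self
      · exact List.mem_cons_of_mem _ hmem
    · intro d hd
      rcases List.mem_cons.1 hd with rfl | hd'
      · exact (PySem.List.foldl_min_le t d).1
      · exact (PySem.List.foldl_min_le t c).2 d hd'

theorem A_char (data : List (List (String × Int))) (h : Pre_solve data) :
    ∃ v, solve data = v ∧ (∃ q, pvS data q ∧ v = |q.1| + |q.2|)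
      ∧ ∀ q, pvS data q → v ≤ |q.1| + |q.2| := by
  obtain ⟨q0, hq0⟩ := pre_nonempty data h
  have hq0mem : (|q0.1| + |q0.2|) ∈ ((((PySem.List.enumerate data 0).foldl pvWireA
      (∅ : Std.HashMap (Int × Int) (PySem.Set Int))).toList.filter
      (fun pw => decide (1 < pw.2.length))).map
      (fun pw => pvManhattan pw.1 (0, 0))) := (mem_distList data _).2 ⟨q0, hq0, rfl⟩
  have hLne : ((((PySem.List.enumerate data 0).foldl pvWireA
      (∅ : Std.HashMap (Int × Int) (PySem.Set Int))).toList.filter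
      (fun pw => decide (1 < pw.2.length))).map
      (fun pw => pvManhattan pw.1 (0, 0))) ≠ [] := by
    intro h0
    rw [h0] at hq0mem
    simp at hq0mem
  cases hmin : PySem.List.min? ((((PySem.List.enumerate data 0).foldl pvWireA
      (∅ : Std.HashMap (Int × Int) (PySem.Set Int))).toList.filter
      (fun pw => decide (1 < pw.2.length))).map
      (fun pw => pvManhattan pw.1 (0, 0))) (fun x => x) with
  | none =>
    rw [PySem.List.min?_eq_none_iff] at hmin
    exact absurd hmin hLne
  | some v =>
    refine ⟨v, ?_, ?_, ?_⟩
    · show solve data = v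
      simp only [solve]
      rw [hmin]
      rfl
    · exact (mem_distList data v).1 (PySem.List.min?_mem hmin)
    · intro q hq
      have hmemq := (mem_distList data (|q.1| + |q.2|)).2 ⟨q, hq, rfl⟩
      simpa using PySem.List.min?_isMin hmin _ hmemq

-- ===== VERDICT (by name: the statement is the Claim_ definition above) =====
theorem solve_spec : Claim_equal_solve := by
  intro data _hdom hpre
  unfold Spec_solve
  obtain ⟨vA, hA, ⟨qA, hSA, hvA⟩, hAmin⟩ := A_char data hpre
  obtain ⟨vB, hB, hBmem, hBmin⟩ := B_char data hpre
  rw [hA, hB]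
  -- vA ≤ vB
  obtain ⟨pr, hpr, s1, hs1, s2, hs2, hcand⟩ := (B_mem data vB).1 hBmem
  obtain ⟨p, hp1, hp2, hdp⟩ := pvCand_sound s1 s2 vB hcand
  have hSp : pvS data p := ⟨pr, hpr, ⟨s1, hs1, hp1⟩, ⟨s2, hs2, hp2⟩⟩
  have h1 : vA ≤ vB := hdp ▸ hAmin p hSp
  -- vB ≤ vA
  obtain ⟨pr', hpr', ⟨t1, ht1, hq1⟩, ⟨t2, ht2, hq2⟩⟩ := hSA
  have hsome := pvCand_complete t1 t2 qA hq1 hq2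
  obtain ⟨dd, hdd⟩ := Option.isSome_iff_exists.1 hsome
  have hmemd : dd ∈ pvCandList (data.map pvSegments) :=
    (B_mem data dd).2 ⟨pr', hpr', t1, ht1, t2, ht2, hdd⟩
  have h2 : vB ≤ vA := le_trans (hBmin dd hmemd)
    (hvA ▸ pvCand_min t1 t2 dd hdd qA hq1 hq2)
  omega
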